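-- pv_equiv track=rewrite | github.com/Jazz23/CodeSlobCleanup | codebases/exclusion-test/utils.py | specifically_another_one
-- ===== SOURCE A (Python) =====
-- def specifically_another_one(y):
--     data = []
--     for i in range(y):
--         if i % 2 == 0:
--             if i % 4 == 0:
--                 data.append(i * 2)
--             else:
--                 data.append(i * 3)
--         else:
--             if i % 3 == 0:
--                 data.append(i + 5)
--             else:
--                 data.append(i - 1)
--     return sum(data)
-- ===== SOURCE B (Python) =====
-- _PA = [0, 2, 3, 6, 7, 9, 10, 13, 14, 16, 17, 20]
-- _PC = [0, 0, 0, 6, 14, 22, 26, 44, 50, 66, 80, 110]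
--
-- def specifically_another_one(y):
--     if y <= 0:
--         return 0
--     q, r = divmod(y, 12)
--     return 126 * q * q - 6 * q + 12 * q * _PA[r] + _PC[r]
-- ===== Notes on version B (the rewrite author's own statement) =====
-- stated objective: faster
-- what changed: Replaced the linear loop that appends one value per index and then sums with a constant-time closed form: full periods of the parity pattern contribute an arithmetic series with a quadratic closed form in the period count, and the partial period is read off two precomputed prefix tables over the residues.
import Mathlib
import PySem

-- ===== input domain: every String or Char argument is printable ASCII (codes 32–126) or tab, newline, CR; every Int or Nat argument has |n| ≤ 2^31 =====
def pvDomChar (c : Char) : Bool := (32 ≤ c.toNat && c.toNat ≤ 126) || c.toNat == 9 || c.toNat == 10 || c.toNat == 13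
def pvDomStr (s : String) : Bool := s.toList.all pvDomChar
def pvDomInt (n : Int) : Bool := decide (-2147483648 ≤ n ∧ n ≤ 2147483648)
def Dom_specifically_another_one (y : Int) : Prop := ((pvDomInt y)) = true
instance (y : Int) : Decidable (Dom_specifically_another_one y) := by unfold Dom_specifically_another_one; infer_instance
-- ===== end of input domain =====

-- B replaces A's O(y) loop by an O(1) closed-form arithmetic-series summation over the 12 residue classes mod 12.

-- ===== PORT A =====
def specifically_another_one (y : Int) : Int :=
  let data := (PySem.List.pyRange 0 y 1).foldl
    (fun d i =>
      if PySem.Int.mod i 2 = 0 then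
        (if PySem.Int.mod i 4 = 0 then d ++ [i * 2] else d ++ [i * 3])
      else
        (if PySem.Int.mod i 3 = 0 then d ++ [i + 5] else d ++ [i - 1])) []
  data.sum

-- ===== PORT B =====
-- prefix tables over one period of 12: pvPA = prefix sums of the linear coefficient at each
-- residue, pvPC = prefix sums of the constant contribution at each residue
def pvPA : List Int := [0, 2, 3, 6, 7, 9, 10, 13, 14, 16, 17, 20]
def pvPC : List Int := [0, 0, 0, 6, 14, 22, 26, 44, 50, 66, 80, 110]

def specifically_another_one_alt (y : Int) : Int :=
  if y ≤ 0 then 0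
  else
    let q := PySem.Int.floordiv y 12
    let r := PySem.Int.mod y 12
    -- Python's list indexing _PA[r] is exact here: 0 ≤ r < 12 always, within range
    126 * q * q - 6 * q + 12 * q * PySem.List.pyGetD pvPA r 0 + PySem.List.pyGetD pvPC r 0

-- ===== PRECONDITION & SPEC =====
def Spec_specifically_another_one (y : Int) (out : Int) : Prop := out = specifically_another_one_alt y
instance (y : Int) (out : Int) : Decidable (Spec_specifically_another_one y out) := by unfold Spec_specifically_another_one; infer_instance

-- ===== CLAIM (what is proved, stated in full; the proofs are below) =====
def Claim_equal_specifically_another_one : Prop := ∀ (y : Int), Dom_specifically_another_one y → Spec_specifically_another_one y (specifically_another_one y)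

-- ===== LEMMAS AND PROOFS =====

/-- the per-index value A appends -/
def pvV (i : Int) : Int :=
  if PySem.Int.mod i 2 = 0 then
    (if PySem.Int.mod i 4 = 0 then i * 2 else i * 3)
  else
    (if PySem.Int.mod i 3 = 0 then i + 5 else i - 1)

lemma pvStep_eq :
    (fun (d : List Int) (i : Int) =>
      if PySem.Int.mod i 2 = 0 then
        (if PySem.Int.mod i 4 = 0 then d ++ [i * 2] else d ++ [i * 3])
      else
        (if PySem.Int.mod i 3 = 0 then d ++ [i + 5] else d ++ [i - 1]))
    = fun d i => d ++ [pvV i] := by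
  funext d i
  unfold pvV
  split_ifs <;> rfl

lemma pvFoldl_app (l : List Int) (init : List Int) :
    l.foldl (fun d i => d ++ [pvV i]) init = init ++ l.map pvV := by
  induction l generalizing init with
  | nil => simp
  | cons x xs ih => simp [List.foldl_cons, ih]

lemma pvAlt_succ (n : Nat) :
    specifically_another_one_alt ((n : Int) + 1)
      = specifically_another_one_alt (n : Int) + pvV (n : Int) := by
  obtain ⟨q, r, hr, rfl⟩ : ∃ q r, r < 12 ∧ n = 12 * q + r :=
    ⟨n / 12, n % 12, by omega, by omega⟩
  by_cases h0 : q = 0 ∧ r = 0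
  · obtain ⟨rfl, rfl⟩ := h0
    decide
  · unfold specifically_another_one_alt pvV
    rw [if_neg (by push_cast; omega), if_neg (by push_cast; omega)]
    have hd : ∀ a : Int, PySem.Int.floordiv a 12 = a / 12 :=
      fun a => PySem.Int.floordiv_eq_ediv_of_pos (by norm_num)
    have hm : ∀ (a b : Int), 0 < b → PySem.Int.mod a b = a % b :=
      fun a b hb => PySem.Int.mod_eq_emod_of_pos hb
    simp only [hd, hm _ 2 (by norm_num), hm _ 3 (by norm_num), hm _ 4 (by norm_num),
      hm _ 12 (by norm_num)]
    push_cast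
    interval_cases r
    · push_cast
      have e1 : (12*(q:Int)+0+1)/12 = (q:Int) := by omega
      have e2 : (12*(q:Int)+0+1)%12 = 1 := by omega
      have e3 : (12*(q:Int)+0)/12 = (q:Int) := by omega
      have e4 : (12*(q:Int)+0)%12 = 0 := by omega
      rw [e1, e2, e3, e4]
      split_ifs <;> first
        | (exfalso; omega)
        | (simp [pvPA, pvPC, PySem.List.pyGetD]; try ring)
    · push_cast
      have e1 : (12*(q:Int)+1+1)/12 = (q:Int) := by omega
      have e2 : (12*(q:Int)+1+1)%12 = 2 := by omega
      have e3 : (12*(q:Int)+1)/12 = (q:Int) := by omega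
      have e4 : (12*(q:Int)+1)%12 = 1 := by omega
      rw [e1, e2, e3, e4]
      split_ifs <;> first
        | (exfalso; omega)
        | (simp [pvPA, pvPC, PySem.List.pyGetD]; try ring)
    · push_cast
      have e1 : (12*(q:Int)+2+1)/12 = (q:Int) := by omega
      have e2 : (12*(q:Int)+2+1)%12 = 3 := by omega
      have e3 : (12*(q:Int)+2)/12 = (q:Int) := by omega
      have e4 : (12*(q:Int)+2)%12 = 2 := by omega
      rw [e1, e2, e3, e4]
      split_ifs <;> first
        | (exfalso; omega)
        | (simp [pvPA, pvPC, PySem.List.pyGetD]; try ring)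
    · push_cast
      have e1 : (12*(q:Int)+3+1)/12 = (q:Int) := by omega
      have e2 : (12*(q:Int)+3+1)%12 = 4 := by omega
      have e3 : (12*(q:Int)+3)/12 = (q:Int) := by omega
      have e4 : (12*(q:Int)+3)%12 = 3 := by omega
      rw [e1, e2, e3, e4]
      split_ifs <;> first
        | (exfalso; omega)
        | (simp [pvPA, pvPC, PySem.List.pyGetD]; try ring)
    · push_cast
      have e1 : (12*(q:Int)+4+1)/12 = (q:Int) := by omega
      have e2 : (12*(q:Int)+4+1)%12 = 5 := by omega
      have e3 : (12*(q:Int)+4)/12 = (q:Int) := by omega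
      have e4 : (12*(q:Int)+4)%12 = 4 := by omega
      rw [e1, e2, e3, e4]
      split_ifs <;> first
        | (exfalso; omega)
        | (simp [pvPA, pvPC, PySem.List.pyGetD]; try ring)
    · push_cast
      have e1 : (12*(q:Int)+5+1)/12 = (q:Int) := by omega
      have e2 : (12*(q:Int)+5+1)%12 = 6 := by omega
      have e3 : (12*(q:Int)+5)/12 = (q:Int) := by omega
      have e4 : (12*(q:Int)+5)%12 = 5 := by omega
      rw [e1, e2, e3, e4]
      split_ifs <;> first
        | (exfalso; omega)
        | (simp [pvPA, pvPC, PySem.List.pyGetD]; try ring)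
    · push_cast
      have e1 : (12*(q:Int)+6+1)/12 = (q:Int) := by omega
      have e2 : (12*(q:Int)+6+1)%12 = 7 := by omega
      have e3 : (12*(q:Int)+6)/12 = (q:Int) := by omega
      have e4 : (12*(q:Int)+6)%12 = 6 := by omega
      rw [e1, e2, e3, e4]
      split_ifs <;> first
        | (exfalso; omega)
        | (simp [pvPA, pvPC, PySem.List.pyGetD]; try ring)
    · push_cast
      have e1 : (12*(q:Int)+7+1)/12 = (q:Int) := by omega
      have e2 : (12*(q:Int)+7+1)%12 = 8 := by omega
      have e3 : (12*(q:Int)+7)/12 = (q:Int) := by omega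
      have e4 : (12*(q:Int)+7)%12 = 7 := by omega
      rw [e1, e2, e3, e4]
      split_ifs <;> first
        | (exfalso; omega)
        | (simp [pvPA, pvPC, PySem.List.pyGetD]; try ring)
    · push_cast
      have e1 : (12*(q:Int)+8+1)/12 = (q:Int) := by omega
      have e2 : (12*(q:Int)+8+1)%12 = 9 := by omega
      have e3 : (12*(q:Int)+8)/12 = (q:Int) := by omega
      have e4 : (12*(q:Int)+8)%12 = 8 := by omega
      rw [e1, e2, e3, e4]
      split_ifs <;> first
        | (exfalso; omega)
        | (simp [pvPA, pvPC, PySem.List.pyGetD]; try ring)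
    · push_cast
      have e1 : (12*(q:Int)+9+1)/12 = (q:Int) := by omega
      have e2 : (12*(q:Int)+9+1)%12 = 10 := by omega
      have e3 : (12*(q:Int)+9)/12 = (q:Int) := by omega
      have e4 : (12*(q:Int)+9)%12 = 9 := by omega
      rw [e1, e2, e3, e4]
      split_ifs <;> first
        | (exfalso; omega)
        | (simp [pvPA, pvPC, PySem.List.pyGetD]; try ring)
    · push_cast
      have e1 : (12*(q:Int)+10+1)/12 = (q:Int) := by omega
      have e2 : (12*(q:Int)+10+1)%12 = 11 := by omega
      have e3 : (12*(q:Int)+10)/12 = (q:Int) := by omega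
      have e4 : (12*(q:Int)+10)%12 = 10 := by omega
      rw [e1, e2, e3, e4]
      split_ifs <;> first
        | (exfalso; omega)
        | (simp [pvPA, pvPC, PySem.List.pyGetD]; try ring)
    · push_cast
      have e1 : (12*(q:Int)+11+1)/12 = ((q:Int)+1) := by omega
      have e2 : (12*(q:Int)+11+1)%12 = 0 := by omega
      have e3 : (12*(q:Int)+11)/12 = (q:Int) := by omega
      have e4 : (12*(q:Int)+11)%12 = 11 := by omega
      rw [e1, e2, e3, e4]
      split_ifs <;> first
        | (exfalso; omega)
        | (simp [pvPA, pvPC, PySem.List.pyGetD]; try ring)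

lemma pvSum_eq (n : Nat) :
    ((List.range n).map (fun k : Nat => pvV (k : Int))).sum
      = specifically_another_one_alt (n : Int) := by
  induction n with
  | zero => decide
  | succ m ih =>
    rw [List.range_succ, List.map_append, List.sum_append]
    push_cast
    rw [pvAlt_succ m]
    simp [ih]

-- ===== VERDICT (by name: the statement is the Claim_ definition above) =====
theorem specifically_another_one_spec : Claim_equal_specifically_another_one := by
  intro y _
  unfold Spec_specifically_another_one specifically_another_one
  simp only [pvStep_eq]
  rw [PySem.List.pyRange_one, pvFoldl_app]
  simp only [List.nil_append, List.map_map]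
  by_cases hy : y ≤ 0
  · have h : (y - 0).toNat = 0 := by omega
    rw [h]
    simp [specifically_another_one_alt, hy]
  · have hs := pvSum_eq y.toNat
    have hy' : ((y.toNat : Nat) : Int) = y := by omega
    rw [hy'] at hs
    rw [show (y - 0).toNat = y.toNat from by omega, ← hs]
    simp [Function.comp_def]
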